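-- pv_equiv track=rewrite | github.com/weon-seongjae/conv | main_app4_gcloud_git.py | prepare_speakers_and_messages
-- ===== SOURCE A (Python) =====
-- def prepare_speakers_and_messages(selected_chapter, chapter_conversations, modifications_dict):
--     speakers_and_messages = [{'chapter': selected_chapter, 'speaker': message['speaker'], 'message': message['message']}
--                          for message in chapter_conversations
--                          if message['speaker'] == 'user']
--     speakers_and_messages.insert(0, {'chapter': selected_chapter, 'speaker': "user", 'message': ""})
--
--     if selected_chapter in modifications_dict:
--         for add in modifications_dict[selected_chapter]['add']:
--             speakers_and_messages.append({'chapter': selected_chapter, 'speaker': add['speaker'], 'message': add['message']})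
--
--         for remove in modifications_dict[selected_chapter]['remove']:
--             speakers_and_messages = [i for i in speakers_and_messages if not (i['speaker'] == remove['speaker'] and remove['message'] in i['message'])]
--
--
--     return speakers_and_messages
-- ===== SOURCE B (Python) =====
-- def prepare_speakers_and_messages(selected_chapter, chapter_conversations, modifications_dict):
--     mods = modifications_dict.get(selected_chapter, {'add': [], 'remove': []})
--     # index the removals by speaker once, so each candidate only consults its own speaker's bans
--     banned = {}
--     for r in mods['remove']:
--         banned.setdefault(r['speaker'], []).append(r['message'])
--     out = []
--
--     def emit(speaker, message):
--         if all(sub not in message for sub in banned.get(speaker, ())):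
--             out.append({'chapter': selected_chapter, 'speaker': speaker, 'message': message})
--
--     emit('user', '')
--     for m in chapter_conversations:
--         if m['speaker'] == 'user':
--             emit(m['speaker'], m['message'])
--     for a in mods['add']:
--         emit(a['speaker'], a['message'])
--     return out
-- ===== Notes on version B (the rewrite author's own statement) =====
-- stated objective: alternative
-- what changed: B builds a per-speaker removal index (dict speaker -> list of banned substrings) once and assembles the result in a single guarded-emit pass over placeholder, user messages and adds, so A's sequence of whole-list-rebuilding remove passes disappears; each candidate consults only its own speaker's bans.
import Mathlib
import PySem

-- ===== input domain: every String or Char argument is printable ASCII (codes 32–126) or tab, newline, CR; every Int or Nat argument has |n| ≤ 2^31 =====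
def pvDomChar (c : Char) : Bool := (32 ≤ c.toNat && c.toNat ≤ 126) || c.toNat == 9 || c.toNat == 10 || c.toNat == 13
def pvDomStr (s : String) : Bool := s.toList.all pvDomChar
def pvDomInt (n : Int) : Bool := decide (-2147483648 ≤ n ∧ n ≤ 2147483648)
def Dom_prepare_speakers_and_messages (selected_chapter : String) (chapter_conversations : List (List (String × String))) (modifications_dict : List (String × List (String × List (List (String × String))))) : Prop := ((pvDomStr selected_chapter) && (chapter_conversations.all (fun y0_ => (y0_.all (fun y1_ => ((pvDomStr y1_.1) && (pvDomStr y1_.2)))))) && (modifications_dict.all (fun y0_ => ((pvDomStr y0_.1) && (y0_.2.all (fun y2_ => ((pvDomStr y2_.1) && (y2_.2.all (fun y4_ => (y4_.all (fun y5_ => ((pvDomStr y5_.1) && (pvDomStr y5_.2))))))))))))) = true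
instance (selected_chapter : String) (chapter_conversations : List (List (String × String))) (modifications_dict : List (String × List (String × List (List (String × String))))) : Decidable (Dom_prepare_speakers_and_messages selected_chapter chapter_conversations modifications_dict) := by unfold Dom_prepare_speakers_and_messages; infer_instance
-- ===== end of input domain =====

-- B indexes the removals by speaker in a dict built once and assembles the result in a single
-- guarded-emit pass (placeholder, then user messages, then adds), replacing A's sequence of
-- whole-list-rebuilding remove passes; same return value as A on Pre_ (objective: alternative).


-- first-match association-list lookup (Python dict indexing / .get)
def pvLookup? {α : Type} (d : List (String × α)) (k : String) : Option α :=
  (List.find? (fun p => p.1 == k) d).map (·.2)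

-- d[k] for a str→str dict, total form; exact under Pre_ (the key is present there)
def pvGetStr (d : List (String × String)) (k : String) : String :=
  (pvLookup? d k).getD ""

-- ===== PORT A =====
def prepare_speakers_and_messages (selected_chapter : String) (chapter_conversations : List (List (String × String))) (modifications_dict : List (String × List (String × List (List (String × String))))) : List (List (String × String)) :=
  -- comprehension over chapter_conversations, then insert(0, placeholder)
  let sam : List (List (String × String)) :=
    [("chapter", selected_chapter), ("speaker", "user"), ("message", "")] ::
      ((chapter_conversations.filter (fun m => pvGetStr m "speaker" == "user")).map
        (fun m => [("chapter", selected_chapter), ("speaker", pvGetStr m "speaker"), ("message", pvGetStr m "message")]))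
  match List.find? (fun p => p.1 == selected_chapter) modifications_dict with
  | none => sam
  | some (_, mods) =>
      -- for add in …['add']: append
      let sam := sam ++ ((pvLookup? mods "add").getD []).map
        (fun a => [("chapter", selected_chapter), ("speaker", pvGetStr a "speaker"), ("message", pvGetStr a "message")])
      -- for remove in …['remove']: rebuild the whole list each time
      ((pvLookup? mods "remove").getD []).foldl
        (fun acc r => acc.filter (fun i =>
          !(pvGetStr i "speaker" == pvGetStr r "speaker" &&
            PySem.Str.isIn (pvGetStr r "message") (pvGetStr i "message")))) sam

-- ===== PORT B =====
def pvEntry (selected_chapter s msg : String) : List (String × String) :=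
  [("chapter", selected_chapter), ("speaker", s), ("message", msg)]

def prepare_speakers_and_messages_alt (selected_chapter : String) (chapter_conversations : List (List (String × String))) (modifications_dict : List (String × List (String × List (List (String × String))))) : List (List (String × String)) :=
  let mods := ((List.find? (fun p => p.1 == selected_chapter) modifications_dict).map (·.2)).getD
    [("add", []), ("remove", [])]
  -- banned: per-speaker removal index, built once (setdefault(...).append(...))
  let banned : PySem.Dict String (List String) :=
    ((pvLookup? mods "remove").getD []).foldl
      (fun d r => d.modify (pvGetStr r "speaker") [] (· ++ [pvGetStr r "message"])) PySem.Dict.empty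
  -- emit's guard: the candidate's message contains none of its own speaker's banned substrings
  let keep : String → String → Bool := fun s msg =>
    (banned.getD s []).all (fun sub => !(PySem.Str.isIn sub msg))
  let out := if keep "user" "" then [pvEntry selected_chapter "user" ""] else []
  let out := chapter_conversations.foldl (fun acc m =>
      if pvGetStr m "speaker" == "user" then
        (if keep (pvGetStr m "speaker") (pvGetStr m "message") then
          acc ++ [pvEntry selected_chapter (pvGetStr m "speaker") (pvGetStr m "message")] else acc)
      else acc) out
  ((pvLookup? mods "add").getD []).foldl (fun acc a =>
      if keep (pvGetStr a "speaker") (pvGetStr a "message") then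
        acc ++ [pvEntry selected_chapter (pvGetStr a "speaker") (pvGetStr a "message")] else acc) out

-- ===== PRECONDITION & SPEC =====
-- Pre_ excludes the inputs where Python A raises KeyError: a conversation message without a 'speaker'
-- key (or a user message without 'message'), or, when selected_chapter is a key of modifications_dict,
-- a modification record without 'add'/'remove' keys or an add/remove entry without 'speaker'/'message'.
-- It is slightly narrower than A's raising set: a remove entry missing 'message' whose speaker matches
-- no element is never dereferenced by A thanks to `and` short-circuiting, so A still returns there
-- while B's eager index build raises (see cite).
def Pre_prepare_speakers_and_messages (selected_chapter : String) (chapter_conversations : List (List (String × String))) (modifications_dict : List (String × List (String × List (List (String × String))))) : Prop :=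
  (∀ m ∈ chapter_conversations, (pvLookup? m "speaker").isSome ∧
      (pvLookup? m "speaker" = some "user" → (pvLookup? m "message").isSome)) ∧
  (∀ mods, (List.find? (fun p => p.1 == selected_chapter) modifications_dict).map (·.2) = some mods →
      (pvLookup? mods "add").isSome ∧ (pvLookup? mods "remove").isSome ∧
      (∀ a ∈ (pvLookup? mods "add").getD [], (pvLookup? a "speaker").isSome ∧ (pvLookup? a "message").isSome) ∧
      (∀ r ∈ (pvLookup? mods "remove").getD [], (pvLookup? r "speaker").isSome ∧ (pvLookup? r "message").isSome))
instance (selected_chapter : String) (chapter_conversations : List (List (String × String))) (modifications_dict : List (String × List (String × List (List (String × String))))) : Decidable (Pre_prepare_speakers_and_messages selected_chapter chapter_conversations modifications_dict) := by unfold Pre_prepare_speakers_and_messages; infer_instance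

def pvWitness_prepare_speakers_and_messages : String × (List (List (String × String))) × (List (String × List (String × List (List (String × String))))) :=
  ("c1", [[("speaker", "user"), ("message", "hi")], [("speaker", "bot"), ("message", "yo")]],
   [("c1", [("add", [[("speaker", "user"), ("message", "new")]]), ("remove", [[("speaker", "user"), ("message", "h")]])])])

def Spec_prepare_speakers_and_messages (selected_chapter : String) (chapter_conversations : List (List (String × String))) (modifications_dict : List (String × List (String × List (List (String × String))))) (out : List (List (String × String))) : Prop := out = prepare_speakers_and_messages_alt selected_chapter chapter_conversations modifications_dict
instance (selected_chapter : String) (chapter_conversations : List (List (String × String))) (modifications_dict : List (String × List (String × List (List (String × String))))) (out : List (List (String × String))) : Decidable (Spec_prepare_speakers_and_messages selected_chapter chapter_conversations modifications_dict out) := by unfold Spec_prepare_speakers_and_messages; infer_instance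

-- ===== CLAIM (what is proved, stated in full; the proofs are below) =====
def Claim_equal_prepare_speakers_and_messages : Prop := ∀ (selected_chapter : String) (chapter_conversations : List (List (String × String))) (modifications_dict : List (String × List (String × List (List (String × String))))), Dom_prepare_speakers_and_messages selected_chapter chapter_conversations modifications_dict → Pre_prepare_speakers_and_messages selected_chapter chapter_conversations modifications_dict → Spec_prepare_speakers_and_messages selected_chapter chapter_conversations modifications_dict (prepare_speakers_and_messages selected_chapter chapter_conversations modifications_dict)

-- ===== LEMMAS AND PROOFS =====

lemma pvGetStr_entry_speaker (sc s m : String) : pvGetStr (pvEntry sc s m) "speaker" = s := by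
  simp [pvEntry, pvGetStr, pvLookup?, List.find?]

lemma pvGetStr_entry_message (sc s m : String) : pvGetStr (pvEntry sc s m) "message" = m := by
  simp [pvEntry, pvGetStr, pvLookup?, List.find?]

-- a sequence of list-rebuilding filter passes equals one pass filtering by "no r matches"
lemma foldl_filter_any {α β : Type} (p : β → α → Bool) (rs : List β) (xs : List α) :
    rs.foldl (fun acc r => acc.filter (fun i => !(p r i))) xs
      = xs.filter (fun i => !(rs.any (fun r => p r i))) := by
  induction rs generalizing xs with
  | nil => simp
  | cons r rs ih =>
      rw [List.foldl_cons, ih, List.filter_filter]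
      apply List.filter_congr
      intro a _
      simp [Bool.not_or, Bool.and_comm]

-- B's per-speaker index consulted at s lists exactly the messages of the removes whose speaker is s
lemma banned_getD (rs : List (List (String × String))) (s : String) :
    ((rs.foldl (fun d r => d.modify (pvGetStr r "speaker") [] (· ++ [pvGetStr r "message"]))
        (PySem.Dict.empty : PySem.Dict String (List String))).getD s [])
      = ((rs.map (fun r => (pvGetStr r "speaker", pvGetStr r "message"))).filter
          (fun p => p.1 == s)).map (·.2) := by
  rw [show rs.foldl (fun d r => d.modify (pvGetStr r "speaker") [] (· ++ [pvGetStr r "message"]))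
        (PySem.Dict.empty : PySem.Dict String (List String))
      = (rs.map (fun r => (pvGetStr r "speaker", pvGetStr r "message"))).foldl
          (fun d p => d.modify p.1 [] (· ++ [p.2])) PySem.Dict.empty from by rw [List.foldl_map]]
  rw [PySem.Dict.getD_foldl_modify_append]
  simp

-- B's emit guard equals A's combined per-remove predicate
lemma keep_eq (rs : List (List (String × String))) (s msg : String) :
    (((rs.foldl (fun d r => d.modify (pvGetStr r "speaker") [] (· ++ [pvGetStr r "message"]))
        (PySem.Dict.empty : PySem.Dict String (List String))).getD s []).all
        (fun sub => !(PySem.Str.isIn sub msg)))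
      = !(rs.any (fun r => s == pvGetStr r "speaker" &&
            PySem.Str.isIn (pvGetStr r "message") msg)) := by
  rw [banned_getD, List.all_map, List.all_filter, List.all_map]
  rw [Bool.eq_iff_iff, List.all_eq_true, Bool.not_eq_true', List.any_eq_false]
  constructor
  · intro h r hr
    have := h r hr
    simp only [Function.comp] at this
    by_cases hs : s = pvGetStr r "speaker"
    · simp [← hs] at this ⊢
      exact this
    · simp [hs]
  · intro h r hr
    have := h r hr
    simp only [Function.comp]
    by_cases hs : pvGetStr r "speaker" = s
    · simp [hs] at this ⊢
      exact this
    · simp [hs]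

-- Source B's conversation loop: outer speaker test, inner emit guard, appended one at a time
lemma foldl_append_if_if {α β : Type} (p q : α → Bool) (f : α → β) (l : List α) (acc : List β) :
    l.foldl (fun acc x => if p x then (if q x then acc ++ [f x] else acc) else acc) acc
      = acc ++ (l.filter (fun x => p x && q x)).map f := by
  induction l generalizing acc with
  | nil => simp
  | cons x xs ih => by_cases hp : p x <;> by_cases hq : q x <;> simp [hp, hq, ih]

-- ===== VERDICT (by name: the statement is the Claim_ definition above) =====
theorem prepare_speakers_and_messages_spec : Claim_equal_prepare_speakers_and_messages := by
  intro sc cc md _ _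
  unfold Spec_prepare_speakers_and_messages
  unfold prepare_speakers_and_messages prepare_speakers_and_messages_alt
  cases hf : List.find? (fun p => p.1 == sc) md with
  | none =>
      simp only [Option.map_none, Option.getD_none,
        show (pvLookup? ([("add", ([] : List (List (String × String)))), ("remove", [])]) "remove").getD [] = [] from rfl,
        show (pvLookup? ([("add", ([] : List (List (String × String)))), ("remove", [])]) "add").getD [] = [] from rfl,
        List.foldl_nil, PySem.Dict.getD_empty, List.all_nil, if_true]
      rw [PySem.List.foldl_append_if]
      simp [pvEntry]
  | some kv =>
      obtain ⟨k, mods⟩ := kv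
      simp only [Option.map_some, Option.getD_some]
      rw [foldl_filter_any (fun r i =>
        pvGetStr i "speaker" == pvGetStr r "speaker" &&
          PySem.Str.isIn (pvGetStr r "message") (pvGetStr i "message"))]
      simp only [keep_eq]
      rw [foldl_append_if_if (fun m => pvGetStr m "speaker" == "user")
            (fun m => !(((pvLookup? mods "remove").getD []).any fun r =>
              pvGetStr m "speaker" == pvGetStr r "speaker" &&
                PySem.Str.isIn (pvGetStr r "message") (pvGetStr m "message")))
            (fun m => pvEntry sc (pvGetStr m "speaker") (pvGetStr m "message")) cc,
          PySem.List.foldl_append_if]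
      rw [show (fun m => [("chapter", sc), ("speaker", pvGetStr m "speaker"), ("message", pvGetStr m "message")])
            = (fun m => pvEntry sc (pvGetStr m "speaker") (pvGetStr m "message")) from rfl,
          show ([("chapter", sc), ("speaker", "user"), ("message", "")] : List (String × String))
            = pvEntry sc "user" "" from rfl]
      simp only [List.filter_append, List.filter_cons, List.filter_map, List.filter_filter,
        Function.comp, pvGetStr_entry_speaker, pvGetStr_entry_message]
      by_cases h0 : (((pvLookup? mods "remove").getD []).any fun r =>
          ("user" : String) == pvGetStr r "speaker" && PySem.Str.isIn (pvGetStr r "message") "") = false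
      · simp only [h0, Bool.not_false, if_true, List.cons_append,
          List.nil_append, List.cons.injEq, true_and]
        congr 2
        exact List.filter_congr (fun m _ => Bool.and_comm _ _)
      · simp only [Bool.not_eq_false] at h0
        simp only [h0, Bool.not_true, Bool.false_eq_true, if_false, List.nil_append]
        congr 2
        exact List.filter_congr (fun m _ => Bool.and_comm _ _)
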